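-- pv_equiv track=rewrite | github.com/AndrewFM/MLFinal | sarcasm_classifier.py | get_misc_features
-- ===== SOURCE A (Python) =====
-- def get_misc_features(tok_sentence):
-- 	features = dict()
-- 	features['exc_count'] = 0
-- 	features['que_count'] = 0
-- 	features['quo_count'] = 0
-- 	features['cap_count'] = 0
--
-- 	for word in tok_sentence:
-- 		if word.isupper():
-- 			features['cap_count'] += 1
-- 		elif word == "!":
-- 			features['exc_count'] += 1
-- 		elif word == "?":
-- 			features['que_count'] += 1
-- 		elif word == '"':
-- 			features['quo_count'] += 1
--
-- 	return features
-- ===== SOURCE B (Python) =====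
-- def get_misc_features(tok_sentence):
--     toks = list(tok_sentence)
--     return {
--         'exc_count': toks.count('!'),
--         'que_count': toks.count('?'),
--         'quo_count': toks.count('"'),
--         'cap_count': sum(1 for w in toks if w.isupper()),
--     }
-- ===== Notes on version B (the rewrite author's own statement) =====
-- stated objective: simpler
-- what changed: Replaces the stateful dict-mutating elif loop with a direct dict literal built from per-key list.count calls and one isupper sum (sound because '!','?','"' are never isupper).
import Mathlib
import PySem

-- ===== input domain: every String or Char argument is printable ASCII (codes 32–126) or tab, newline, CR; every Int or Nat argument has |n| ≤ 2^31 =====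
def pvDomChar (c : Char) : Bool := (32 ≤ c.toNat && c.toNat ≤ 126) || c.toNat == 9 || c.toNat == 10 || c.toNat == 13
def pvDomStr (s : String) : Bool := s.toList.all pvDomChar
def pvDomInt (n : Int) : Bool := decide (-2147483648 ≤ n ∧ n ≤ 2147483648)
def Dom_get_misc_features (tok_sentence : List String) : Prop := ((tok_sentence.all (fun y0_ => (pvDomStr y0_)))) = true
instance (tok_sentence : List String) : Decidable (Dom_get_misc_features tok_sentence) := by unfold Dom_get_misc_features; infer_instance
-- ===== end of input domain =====

-- B replaces A's stateful dict-mutating elif loop by a dict literal built from per-key counts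
-- and one isupper pass (simpler; sound since '!', '?', '"' are never isupper).


-- ===== PORT A =====
-- str.isupper(): at least one cased char and no lowercase char; exact on the ASCII domain
def pyIsupper (s : String) : Bool :=
  (s.toList.any (fun c => PySem.Chars.islower c || PySem.Chars.isupper c)) &&
    !(s.toList.any (fun c => PySem.Chars.islower c))

def get_misc_features (tok_sentence : List String) : List (String × Int) :=
  let features : PySem.Dict String Int :=
    ((((PySem.Dict.empty).insert "exc_count" 0).insert "que_count" 0).insert
        "quo_count" 0).insert "cap_count" 0
  let features := tok_sentence.foldl (fun d word =>
    if pyIsupper word then d.modify "cap_count" 0 (· + 1)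
    else if word == "!" then d.modify "exc_count" 0 (· + 1)
    else if word == "?" then d.modify "que_count" 0 (· + 1)
    else if word == "\"" then d.modify "quo_count" 0 (· + 1)
    else d) features
  features.items

-- ===== PORT B =====
def get_misc_features_alt (tok_sentence : List String) : List (String × Int) :=
  [("exc_count", (tok_sentence.count "!" : Int)),
   ("que_count", (tok_sentence.count "?" : Int)),
   ("quo_count", (tok_sentence.count "\"" : Int)),
   ("cap_count", ((tok_sentence.filter (fun w => pyIsupper w)).length : Int))]

-- ===== PRECONDITION & SPEC =====
def Spec_get_misc_features (tok_sentence : List String) (out : List (String × Int)) : Prop := out = get_misc_features_alt tok_sentence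
instance (tok_sentence : List String) (out : List (String × Int)) : Decidable (Spec_get_misc_features tok_sentence out) := by unfold Spec_get_misc_features; infer_instance

-- ===== CLAIM (what is proved, stated in full; the proofs are below) =====
def Claim_equal_get_misc_features : Prop := ∀ (tok_sentence : List String), Dom_get_misc_features tok_sentence → Spec_get_misc_features tok_sentence (get_misc_features tok_sentence)

-- ===== LEMMAS AND PROOFS =====

-- the four-key state dict A's loop maintains
def featDict (e q u c : Int) : PySem.Dict String Int :=
  ((((PySem.Dict.empty).insert "exc_count" e).insert "que_count" q).insert
      "quo_count" u).insert "cap_count" c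

lemma featDict_modify_cap (e q u c : Int) :
    (featDict e q u c).modify "cap_count" 0 (· + 1) = featDict e q u (c + 1) := by
  rfl

lemma featDict_modify_exc (e q u c : Int) :
    (featDict e q u c).modify "exc_count" 0 (· + 1) = featDict (e + 1) q u c := by
  rfl

lemma featDict_modify_que (e q u c : Int) :
    (featDict e q u c).modify "que_count" 0 (· + 1) = featDict e (q + 1) u c := by
  rfl

lemma featDict_modify_quo (e q u c : Int) :
    (featDict e q u c).modify "quo_count" 0 (· + 1) = featDict e q (u + 1) c := by
  rfl

lemma pyIsupper_bang : pyIsupper "!" = false := by decide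
lemma pyIsupper_que : pyIsupper "?" = false := by decide
lemma pyIsupper_quo : pyIsupper "\"" = false := by decide

lemma loop_featDict (l : List String) : ∀ (e q u c : Int),
    l.foldl (fun d word =>
      if pyIsupper word then d.modify "cap_count" 0 (· + 1)
      else if word == "!" then d.modify "exc_count" 0 (· + 1)
      else if word == "?" then d.modify "que_count" 0 (· + 1)
      else if word == "\"" then d.modify "quo_count" 0 (· + 1)
      else d) (featDict e q u c)
    = featDict (e + l.count "!") (q + l.count "?") (u + l.count "\"")
        (c + (l.filter (fun w => pyIsupper w)).length) := by
  induction l with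
  | nil => intro e q u c; simp
  | cons x xs ih =>
    intro e q u c
    rw [List.foldl_cons]
    by_cases hup : pyIsupper x
    · have hb : x ≠ "!" := by rintro rfl; simp [pyIsupper_bang] at hup
      have hq : x ≠ "?" := by rintro rfl; simp [pyIsupper_que] at hup
      have hu : x ≠ "\"" := by rintro rfl; simp [pyIsupper_quo] at hup
      rw [if_pos hup, featDict_modify_cap, ih]
      simp [List.count_cons, List.filter_cons, hup, hb, hq, hu]
      ring
    · rw [if_neg (by simp [hup])]
      by_cases hb : x = "!"
      · subst hb
        rw [if_pos (by decide), featDict_modify_exc, ih]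
        simp [List.count_cons, List.filter_cons, hup]
        ring
      · rw [if_neg (by simp [hb])]
        by_cases hq : x = "?"
        · subst hq
          rw [if_pos (by decide), featDict_modify_que, ih]
          simp [List.count_cons, List.filter_cons, hup]
          ring
        · rw [if_neg (by simp [hq])]
          by_cases hu : x = "\""
          · subst hu
            rw [if_pos (by decide), featDict_modify_quo, ih]
            simp [List.count_cons, List.filter_cons, hup]
            ring
          · rw [if_neg (by simp [hu]), ih]
            simp [List.count_cons, List.filter_cons, hup, hb, hq, hu]

lemma featDict_items (e q u c : Int) :
    (featDict e q u c).items =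
      [("exc_count", e), ("que_count", q), ("quo_count", u), ("cap_count", c)] := by
  rfl

-- ===== VERDICT (by name: the statement is the Claim_ definition above) =====
theorem get_misc_features_spec : Claim_equal_get_misc_features := by
  intro l _
  unfold Spec_get_misc_features get_misc_features get_misc_features_alt
  have h0 : ((((PySem.Dict.empty).insert "exc_count" (0:Int)).insert "que_count" 0).insert
      "quo_count" 0).insert "cap_count" 0 = featDict 0 0 0 0 := rfl
  simp only [h0, loop_featDict, featDict_items, zero_add]
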